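-- pv_equiv track=rewrite | github.com/MrBrantCode/unitest_baseline | mut_generate/mist_train_cf/cf_929/solution.py | sum_of_squares
-- ===== SOURCE A (Python) =====
-- import math
--
-- def is_prime(num):
--     if num < 2:
--         return False
--     for i in range(2, int(math.sqrt(num)) + 1):
--         if num % i == 0:
--             return False
--     return True
--
-- def sum_of_squares(arr):
--     prime_sum = 0
--     prime_count = 0
--     composite_count = 0
--     prime_nums = []
--
--     for num in arr:
--         if is_prime(num):
--             prime_sum += num ** 2
--             prime_count += 1
--             prime_nums.append(num)
--         else:
--             composite_count += 1
--
--     prime_nums.sort()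
--
--     return prime_sum, prime_count, composite_count, prime_nums
-- ===== SOURCE B (Python) =====
-- import math
--
-- def is_prime(num):
--     if num < 2:
--         return False
--     for i in range(2, int(math.sqrt(num)) + 1):
--         if num % i == 0:
--             return False
--     return True
--
-- def sum_of_squares(arr):
--     # Count multiplicities first, then test primality ONCE per distinct value,
--     # walking the distinct values in sorted order so the prime list comes out
--     # already sorted (no final sort of the prime list).
--     counts = {}
--     for n in arr:
--         counts[n] = counts.get(n, 0) + 1
--     prime_sum = 0
--     prime_count = 0
--     composite_count = 0
--     prime_nums = []
--     for v in sorted(counts):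
--         c = counts[v]
--         if is_prime(v):
--             prime_sum += v * v * c
--             prime_count += c
--             prime_nums.extend([v] * c)
--         else:
--             composite_count += c
--     return prime_sum, prime_count, composite_count, prime_nums
-- ===== Notes on version B (the rewrite author's own statement) =====
-- stated objective: alternative
-- what changed: Replaces A's per-element loop plus final sort of the prime list by a multiplicity counter: build a dict of counts in one pass, then iterate the DISTINCT values in sorted order, testing primality once per distinct value and emitting each prime with its multiplicity, so the prime list is produced already sorted and no sort of the (possibly duplicate-heavy) prime list happens.
import Mathlib
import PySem

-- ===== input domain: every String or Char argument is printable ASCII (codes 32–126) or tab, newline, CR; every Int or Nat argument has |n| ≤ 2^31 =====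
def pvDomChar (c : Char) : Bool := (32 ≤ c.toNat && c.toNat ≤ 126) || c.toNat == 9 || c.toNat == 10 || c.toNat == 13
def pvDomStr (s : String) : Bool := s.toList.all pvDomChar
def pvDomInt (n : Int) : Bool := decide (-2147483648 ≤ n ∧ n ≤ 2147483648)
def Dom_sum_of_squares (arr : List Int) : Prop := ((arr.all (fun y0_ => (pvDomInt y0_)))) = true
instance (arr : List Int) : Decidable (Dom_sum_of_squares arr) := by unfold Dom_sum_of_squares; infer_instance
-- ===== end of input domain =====

-- B counts multiplicities in a dict first, then walks the DISTINCT values in sorted order, testing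
-- primality once per distinct value and emitting each prime with its multiplicity, so the prime list
-- is built already sorted and the prime list is never sorted afterwards (alternative decomposition).

-- shared helper: is_prime, byte-for-byte in both programs
-- (int(math.sqrt(num)) = Nat.sqrt exactly on the domain |num| ≤ 2^31: doubles are exact there)
def isPrime (num : Int) : Bool :=
  if num < 2 then false
  else !((PySem.List.pyRange 2 ((Nat.sqrt num.toNat : Int) + 1) 1).any (fun i => PySem.Int.mod num i == 0))

-- ===== PORT A =====
def sum_of_squares (arr : List Int) : Int × Int × Int × List Int :=
  let st := arr.foldl (fun (st : Int × Int × Int × List Int) num =>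
      if isPrime num then (st.1 + num ^ 2, st.2.1 + 1, st.2.2.1, st.2.2.2 ++ [num])
      else (st.1, st.2.1, st.2.2.1 + 1, st.2.2.2)) (0, 0, 0, [])
  (st.1, st.2.1, st.2.2.1, PySem.List.sorted st.2.2.2 (fun x => x) false)

-- ===== PORT B =====
-- counts[v] never raises (v is a key); ported as getD v 0.  [v] * c with c = counts[v] ≥ 0 is
-- List.replicate c.toNat v.
def sum_of_squares_alt (arr : List Int) : Int × Int × Int × List Int :=
  let counts := arr.foldl (fun (d : PySem.Dict Int Int) n => d.insert n (d.getD n 0 + 1)) PySem.Dict.empty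
  (PySem.List.sorted counts.keys (fun x => x) false).foldl
    (fun (st : Int × Int × Int × List Int) v =>
      if isPrime v then
        (st.1 + v * v * counts.getD v 0, st.2.1 + counts.getD v 0, st.2.2.1,
         st.2.2.2 ++ List.replicate (counts.getD v 0).toNat v)
      else (st.1, st.2.1, st.2.2.1 + counts.getD v 0, st.2.2.2)) (0, 0, 0, [])

-- ===== PRECONDITION & SPEC =====
def Spec_sum_of_squares (arr : List Int) (out : Int × Int × Int × List Int) : Prop := out = sum_of_squares_alt arr
instance (arr : List Int) (out : Int × Int × Int × List Int) : Decidable (Spec_sum_of_squares arr out) := by unfold Spec_sum_of_squares; infer_instance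

-- ===== CLAIM =====
def Claim_equal_sum_of_squares : Prop := ∀ (arr : List Int), Dom_sum_of_squares arr → Spec_sum_of_squares arr (sum_of_squares arr)

-- ===== LEMMAS AND PROOFS =====
theorem loopA_spec (arr : List Int) (s c comp : Int) (lst : List Int) :
    arr.foldl (fun (st : Int × Int × Int × List Int) num =>
      if isPrime num then (st.1 + num ^ 2, st.2.1 + 1, st.2.2.1, st.2.2.2 ++ [num])
      else (st.1, st.2.1, st.2.2.1 + 1, st.2.2.2)) (s, c, comp, lst) =
    (s + (((arr.filter (fun n => isPrime n)).map (fun n => n * n)).sum),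
     c + ((arr.filter (fun n => isPrime n)).length : Int),
     comp + ((arr.filter (fun n => !isPrime n)).length : Int),
     lst ++ arr.filter (fun n => isPrime n)) := by
  induction arr generalizing s c comp lst with
  | nil => simp
  | cons x xs ih =>
    simp only [List.foldl_cons, List.filter_cons]
    by_cases h : isPrime x
    · simp only [h, if_true, Bool.not_true, Bool.false_eq_true, ite_false]
      rw [ih]
      simp only [Prod.mk.injEq, List.map_cons, List.sum_cons, List.length_cons]
      and_intros <;> first | trivial | (push_cast; ring1) | simp
    · simp only [h, Bool.not_false, if_false, ite_true, Bool.false_eq_true]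
      rw [ih]
      simp only [Prod.mk.injEq, List.length_cons]
      and_intros <;> first | trivial | (push_cast; ring1)

theorem count_filter' (l : List Int) (p : Int → Bool) (a : Int) :
    (l.filter p).count a = if p a then l.count a else 0 := by
  induction l with
  | nil => simp
  | cons x xs ih =>
    by_cases hx : p x <;> by_cases hax : a = x <;>
      simp_all [List.count_cons] <;> simp [show ¬ x = a from fun h => hax h.symm]

theorem blocks_perm (K : List Int) : ∀ (L : List Int), K.Nodup → (∀ x ∈ L, x ∈ K) →
    (K.flatMap (fun v => List.replicate (L.count v) v)).Perm L := by
  induction K with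
  | nil =>
    intro L _ hmem
    have : L = [] := List.eq_nil_iff_forall_not_mem.mpr (fun x hx => by simpa using hmem x hx)
    simp [this]
  | cons k K' ih =>
    intro L hnd hmem
    have hk : k ∉ K' := (List.nodup_cons.mp hnd).1
    have hnd' : K'.Nodup := (List.nodup_cons.mp hnd).2
    have hcnt : ∀ v ∈ K', (L.filter (fun x => x != k)).count v = L.count v := by
      intro v hv
      have hvk : v ≠ k := fun h => hk (h ▸ hv)
      simp [List.count_filter, hvk]
    have hflat : K'.flatMap (fun v => List.replicate (L.count v) v)
        = K'.flatMap (fun v => List.replicate ((L.filter (fun x => x != k)).count v) v) := by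
      apply List.flatMap_congr
      intro v hv; rw [hcnt v hv]
    have hperm' : (K'.flatMap (fun v => List.replicate ((L.filter (fun x => x != k)).count v) v)).Perm
        (L.filter (fun x => x != k)) := by
      apply ih _ hnd'
      intro x hx
      have hx' := List.mem_filter.mp hx
      have hxk : x ≠ k := by simpa using hx'.2
      rcases List.mem_cons.mp (hmem x hx'.1) with h | h
      · exact absurd h hxk
      · exact h
    have hrep : List.replicate (L.count k) k = L.filter (fun x => x == k) := by
      rw [List.filter_beq]
    have hstep1 : (k :: K').flatMap (fun v => List.replicate (L.count v) v)
        = L.filter (fun x => x == k) ++ K'.flatMap (fun v => List.replicate ((L.filter (fun x => x != k)).count v) v) := by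
      rw [List.flatMap_cons, hrep, hflat]
    rw [hstep1]
    refine ((hperm'.append_left _).trans ?_)
    have := List.filter_append_perm (fun x => x == k) L
    simpa [bne] using this

theorem blocks_pairwise (K : List Int) (n : Int → Nat) (h : K.Pairwise (· < ·)) :
    (K.flatMap (fun v => List.replicate (n v) v)).Pairwise (· ≤ ·) := by
  induction K with
  | nil => simp
  | cons k K' ih =>
    rcases List.pairwise_cons.mp h with ⟨hk, h'⟩
    simp only [List.flatMap_cons]
    rw [List.pairwise_append]
    refine ⟨List.pairwise_replicate.mpr (Or.inr le_rfl), ih h', ?_⟩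
    intro a ha b hb
    have ha' : a = k := List.eq_of_mem_replicate ha
    rcases List.mem_flatMap.mp hb with ⟨v, hv, hbv⟩
    have hb' : b = v := List.eq_of_mem_replicate hbv
    subst ha'; subst hb'
    exact le_of_lt (hk _ hv)

theorem loopB_spec (arr : List Int) (K : List Int) : ∀ (s c comp : Int) (lst : List Int),
    K.foldl (fun (st : Int × Int × Int × List Int) v =>
      if isPrime v then
        (st.1 + v * v * (arr.count v : Int), st.2.1 + (arr.count v : Int), st.2.2.1,
         st.2.2.2 ++ List.replicate ((arr.count v : Int)).toNat v)
      else (st.1, st.2.1, st.2.2.1 + (arr.count v : Int), st.2.2.2)) (s, c, comp, lst) =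
    (s + (((K.flatMap (fun v => if isPrime v then List.replicate (arr.count v) v else [])).map (fun n => n * n)).sum),
     c + ((K.flatMap (fun v => if isPrime v then List.replicate (arr.count v) v else [])).length : Int),
     comp + ((K.flatMap (fun v => if isPrime v then [] else List.replicate (arr.count v) v)).length : Int),
     lst ++ K.flatMap (fun v => if isPrime v then List.replicate (arr.count v) v else [])) := by
  induction K with
  | nil => simp
  | cons k K' ih =>
    intro s c comp lst
    simp only [List.foldl_cons, List.flatMap_cons]
    by_cases h : isPrime k
    · simp only [h, if_true]
      rw [ih]
      simp only [Prod.mk.injEq, List.map_append, List.sum_append, List.length_append,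
        List.map_replicate, List.sum_replicate, List.length_replicate, List.append_assoc,
        Int.toNat_natCast]
      and_intros <;> first | trivial | (push_cast [nsmul_eq_mul, List.length_nil]; ring1)
    · simp only [h]
      rw [ih]
      simp only [Prod.mk.injEq, List.length_append]
      and_intros <;> first | trivial | (push_cast [List.length_replicate, List.length_nil]; ring1)

theorem sum_of_squares_spec : Claim_equal_sum_of_squares := by
  intro arr _
  unfold Spec_sum_of_squares sum_of_squares sum_of_squares_alt
  rw [loopA_spec]
  rw [show arr.foldl (fun (d : PySem.Dict Int Int) n => d.insert n (d.getD n 0 + 1)) PySem.Dict.empty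
      = PySem.Dict.counter arr from PySem.Dict.foldl_insert_getD_add_one_eq_counter arr]
  simp only [PySem.Dict.getD_counter, PySem.Dict.keys_counter]
  rw [loopB_spec]
  -- names and facts about the sorted distinct values
  have hpwlt := PySem.List.sorted_ofList_pairwise_lt (xs := arr)
  set K := PySem.List.sorted (PySem.Set.ofList arr) (fun x => x) false with hK
  have hKnd : K.Nodup := hpwlt.imp (fun h => ne_of_lt h)
  set P := arr.filter (fun n => isPrime n) with hP
  set Q := arr.filter (fun n => !isPrime n) with hQ
  have hgb : (fun v => if isPrime v then List.replicate (arr.count v) v else [])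
      = fun v => List.replicate (P.count v) v := by
    funext v
    by_cases h : isPrime v <;> simp [hP, count_filter', h]
  have hgc : (fun v => if isPrime v then [] else List.replicate (arr.count v) v)
      = fun v => List.replicate (Q.count v) v := by
    funext v
    by_cases h : isPrime v <;> simp [hQ, count_filter', h]
  rw [hgb, hgc]
  have hmemK : ∀ (l : List Int), (∀ x ∈ l, x ∈ arr) → ∀ x ∈ l, x ∈ K := by
    intro l hl x hx
    rw [hK, PySem.List.mem_sorted, PySem.Set.mem_ofList]
    exact hl x hx
  have hpermP : (K.flatMap (fun v => List.replicate (P.count v) v)).Perm P :=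
    blocks_perm K P hKnd (hmemK P (fun x hx => (List.mem_filter.mp hx).1))
  have hpermQ : (K.flatMap (fun v => List.replicate (Q.count v) v)).Perm Q :=
    blocks_perm K Q hKnd (hmemK Q (fun x hx => (List.mem_filter.mp hx).1))
  have hsortP : PySem.List.sorted P (fun x => x) false
      = K.flatMap (fun v => List.replicate (P.count v) v) :=
    PySem.List.sorted_id_eq_of_perm_of_pairwise P _ hpermP (blocks_pairwise K _ hpwlt)
  refine Prod.ext ?_ (Prod.ext ?_ (Prod.ext ?_ ?_)) <;> simp only [zero_add, List.nil_append]
  · exact ((hpermP.map (fun n => n * n)).sum_eq).symm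
  · exact_mod_cast congrArg (fun (n : Nat) => (n : Int)) hpermP.length_eq.symm
  · exact_mod_cast congrArg (fun (n : Nat) => (n : Int)) hpermQ.length_eq.symm
  · exact hsortP
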